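-- pv_equiv track=rewrite | github.com/ckoons/BubbleSpacetimeTheory | play/toy_291_probe_hierarchy.py | probe_dpll
-- ===== SOURCE A (Python) =====
-- from collections import defaultdict
--
-- def up(clauses, n, assign):
--     """Unit propagation. Returns (assignment_dict, contradiction_bool)."""
--     a = dict(assign)
--     changed = True
--     while changed:
--         changed = False
--         for cl in clauses:
--             unset = []
--             sat = False
--             for lit in cl:
--                 v = abs(lit)
--                 if v in a:
--                     if (lit > 0) == a[v]:
--                         sat = True
--                         break
--                 else:
--                     unset.append(lit)
--             if sat:
--                 continue
--             if len(unset) == 0: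
--                 return a, True  # contradiction
--             if len(unset) == 1:
--                 lit = unset[0]
--                 v = abs(lit)
--                 if v not in a:
--                     a[v] = (lit > 0)
--                     changed = True
--     return a, False
--
-- def probe_dpll(clauses, n, var, val, depth):
--     """Depth-limited DPLL. Branch on most-constrained variable.
--     Return intersection of all leaf assignments (forced regardless of choices)."""
--     def _rec(assign, d):
--         a, c = up(clauses, n, assign)
--         if c:
--             return []
--         if d >= depth:
--             return [a]
--         unset = [v for v in range(1, n + 1) if v not in a]
--         if not unset:
--             return [a]
--         # Most constrained variable
--         counts = defaultdict(int)
--         for cl in clauses: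
--             cl_sat = any(abs(l) in a and (l > 0) == a[abs(l)] for l in cl)
--             if not cl_sat:
--                 for l in cl:
--                     if abs(l) not in a:
--                         counts[abs(l)] += 1
--         if not counts:
--             return [a]
--         bv = max(counts, key=counts.get)
--         return (_rec({**a, bv: True}, d + 1) +
--                 _rec({**a, bv: False}, d + 1))
--
--     leaves = _rec({var: val}, 0)
--     if not leaves:
--         return None
--     # Intersection: variables with same value in ALL leaves
--     result = {}
--     for v in range(1, n + 1):
--         vals = set()
--         all_have = True
--         for leaf in leaves:
--             if v in leaf:
--                 vals.add(leaf[v])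
--             else:
--                 all_have = False
--                 break
--         if all_have and len(vals) == 1:
--             result[v] = vals.pop()
--     return result
-- ===== SOURCE B (Python) =====
-- def up(clauses, n, assign):
--     """Unit propagation. Returns (assignment_dict, contradiction_bool)."""
--     a = dict(assign)
--     changed = True
--     while changed:
--         changed = False
--         for cl in clauses:
--             unset = []
--             sat = False
--             for lit in cl:
--                 v = abs(lit)
--                 if v in a:
--                     if (lit > 0) == a[v]:
--                         sat = True
--                         break
--                 else:
--                     unset.append(lit)
--             if sat:
--                 continue
--             if len(unset) == 0:
--                 return a, True
--             if len(unset) == 1: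
--                 lit = unset[0]
--                 v = abs(lit)
--                 if v not in a:
--                     a[v] = (lit > 0)
--                     changed = True
--     return a, False
--
--
-- def _pick_branch(clauses, a):
--     """Most-constrained unassigned variable, or None (same choice as A)."""
--     counts = {}
--     for cl in clauses:
--         cl_sat = any(abs(l) in a and (l > 0) == a[abs(l)] for l in cl)
--         if not cl_sat:
--             for l in cl:
--                 if abs(l) not in a:
--                     counts[abs(l)] = counts.get(abs(l), 0) + 1
--     if not counts:
--         return None
--     return max(counts, key=counts.get)
--
--
-- def probe_dpll(clauses, n, var, val, depth):
--     """Depth-limited DPLL; returns the forced (common-to-all-leaves) assignment.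
--
--     Instead of collecting every leaf assignment and intersecting afterwards,
--     the intersection (None = no leaf reached yet) is threaded through the
--     recursion and narrowed on the fly; an already-empty intersection prunes
--     the remaining subtree."""
--     def _go(assign, d):
--         a, c = up(clauses, n, assign)
--         if c:
--             return None
--         if d >= depth:
--             return a
--         if all(v in a for v in range(1, n + 1)):
--             return a
--         bv = _pick_branch(clauses, a)
--         if bv is None:
--             return a
--         left = _go({**a, bv: True}, d + 1)
--         if left is not None and not left:
--             return left  # empty intersection can only stay empty
--         right = _go({**a, bv: False}, d + 1)
--         if left is None:
--             return right
--         if right is None: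
--             return left
--         return {k: w for k, w in left.items() if right.get(k) == w}
--
--     inter = _go({var: val}, 0)
--     if inter is None:
--         return None
--     return {v: inter[v] for v in range(1, n + 1) if v in inter}
-- ===== Notes on version B (the rewrite author's own statement) =====
-- stated objective: alternative
-- what changed: B eliminates A's collect-all-leaf-assignments list and the per-variable intersection pass over it: the running intersection (None = no leaf yet) is threaded through the recursion itself, two subtree results are merged by narrowing one dict against the other, and an already-empty intersection prunes the right subtree; unit propagation and the branch-variable choice are kept identical so the explored tree is the same.
import Mathlib
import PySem

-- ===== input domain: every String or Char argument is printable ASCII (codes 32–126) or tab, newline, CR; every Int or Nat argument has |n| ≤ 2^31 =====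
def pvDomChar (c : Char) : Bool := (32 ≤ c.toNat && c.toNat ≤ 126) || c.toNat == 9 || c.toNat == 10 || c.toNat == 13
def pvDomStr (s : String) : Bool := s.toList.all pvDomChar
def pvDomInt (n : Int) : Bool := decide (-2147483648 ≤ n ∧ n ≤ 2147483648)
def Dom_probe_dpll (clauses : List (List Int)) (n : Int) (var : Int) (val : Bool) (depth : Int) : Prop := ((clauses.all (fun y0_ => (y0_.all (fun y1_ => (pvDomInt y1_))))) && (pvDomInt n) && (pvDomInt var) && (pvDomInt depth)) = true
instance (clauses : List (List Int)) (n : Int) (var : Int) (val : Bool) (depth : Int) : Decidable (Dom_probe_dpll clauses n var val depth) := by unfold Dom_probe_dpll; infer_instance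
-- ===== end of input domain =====

-- B threads the leaf-intersection through the recursion (Option dict, pruning on an
-- empty intersection) instead of A's collect-all-leaves-then-intersect; `up` and the
-- branch-variable choice are shared, so both explore the same tree.

-- ===== PORT A =====
-- shared helper: the inner literal scan of `up` (for lit in cl: … with break)
def pvLitScan (a : PySem.Dict Int Bool) : List Int → List Int → (List Int × Bool)
  | [], unset => (unset, false)
  | lit :: rest, unset =>
    match a.get? |lit| with
    | some b => if decide (lit > 0) == b then (unset, true) else pvLitScan a rest unset
    | none => pvLitScan a rest (unset ++ [lit])

-- shared helper: one pass of `up` over the clause list; returns (a, contradiction, changed)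
def pvUpPass : PySem.Dict Int Bool → Bool → List (List Int) → (PySem.Dict Int Bool × Bool × Bool)
  | a, changed, [] => (a, false, changed)
  | a, changed, cl :: rest =>
    match pvLitScan a cl [] with
    | (unset, sat) =>
      if sat then pvUpPass a changed rest
      else
        match unset with
        | [] => (a, true, changed)
        | [lit] =>
          if a.contains |lit| then pvUpPass a changed rest
          else pvUpPass (a.insert |lit| (decide (lit > 0))) true rest
        | _ => pvUpPass a changed rest

-- shared helper: the `while changed` loop of `up` (fuel makes it total; each repeated
-- pass adds at least one assignment drawn from the clause variables, so the fuel
-- `clauses.flatten.length + 1` used below is never exhausted on any input)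
def pvUpLoop (clauses : List (List Int)) : Nat → PySem.Dict Int Bool → (PySem.Dict Int Bool × Bool)
  | 0, a => (a, false)
  | fuel + 1, a =>
    match pvUpPass a false clauses with
    | (a', contra, changed) =>
      if contra then (a', true)
      else if changed then pvUpLoop clauses fuel a'
      else (a', false)

-- `up(clauses, n, assign)` (n is unused by the Python too)
def pvUp (clauses : List (List Int)) (_n : Int) (assign : PySem.Dict Int Bool) : PySem.Dict Int Bool × Bool :=
  pvUpLoop clauses (clauses.flatten.length + 1) assign

-- shared helper: the most-constrained-variable choice (A's counts/max block)
def pvPickBranch (clauses : List (List Int)) (a : PySem.Dict Int Bool) : Option Int :=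
  let counts := clauses.foldl (fun d cl =>
    if cl.any (fun l => match a.get? |l| with | some b => decide (l > 0) == b | none => false)
    then d
    else cl.foldl (fun d l => if a.contains |l| then d else d.modify |l| 0 (· + 1)) d)
    PySem.Dict.empty
  match counts.items with
  | [] => none
  | p :: ps => some ((ps.foldl (fun best q => if q.2 > best.2 then q else best) p).1)

-- A's `_rec`, returning the list of leaf assignments (fuel: each branching step
-- assigns a fresh clause variable, so `clauses.flatten.length + 2` always suffices)
def pvRecA (clauses : List (List Int)) (n : Int) (depth : Int) : Nat → PySem.Dict Int Bool → Int → List (PySem.Dict Int Bool)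
  | 0, _, _ => []
  | fuel + 1, assign, d =>
    match pvUp clauses n assign with
    | (a, c) =>
      if c then []
      else if d ≥ depth then [a]
      else
        let unset := (PySem.List.pyRange 1 (n + 1) 1).filter (fun v => !(a.contains v))
        if unset.isEmpty then [a]
        else
          match pvPickBranch clauses a with
          | none => [a]
          | some bv =>
            pvRecA clauses n depth fuel (a.insert bv true) (d + 1) ++
            pvRecA clauses n depth fuel (a.insert bv false) (d + 1)

-- A's inner `for leaf in leaves` loop (with break) for one variable v
def pvCollectVals (v : Int) : List (PySem.Dict Int Bool) → PySem.Set Bool → (PySem.Set Bool × Bool)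
  | [], vals => (vals, true)
  | leaf :: rest, vals =>
    match leaf.get? v with
    | some b => pvCollectVals v rest (vals.add b)
    | none => (vals, false)

def probe_dpll (clauses : List (List Int)) (n : Int) (var : Int) (val : Bool) (depth : Int) : Option (List (Int × Bool)) :=
  let leaves := pvRecA clauses n depth (clauses.flatten.length + 2) (PySem.Dict.ofList [(var, val)]) 0
  if leaves.isEmpty then none
  else
    some ((PySem.List.pyRange 1 (n + 1) 1).foldl (fun res v =>
      match pvCollectVals v leaves PySem.Set.empty with
      | (vals, allHave) =>
        if allHave then
          match vals with
          | [b] => res ++ [(v, b)]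
          | _ => res
        else res) [])

-- ===== PORT B =====
-- B's dict comprehension {k: w for k, w in left.items() if right.get(k) == w}
def pvNarrow (x y : PySem.Dict Int Bool) : PySem.Dict Int Bool :=
  PySem.Dict.mk (x.items.filter (fun p => y.get? p.1 == some p.2))

-- B's `_go`: same tree, but the running intersection (none = no leaf yet) is
-- threaded through; an empty intersection prunes the right subtree
def pvRecB (clauses : List (List Int)) (n : Int) (depth : Int) : Nat → PySem.Dict Int Bool → Int → Option (PySem.Dict Int Bool)
  | 0, _, _ => none
  | fuel + 1, assign, d =>
    match pvUp clauses n assign with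
    | (a, c) =>
      if c then none
      else if d ≥ depth then some a
      else if (PySem.List.pyRange 1 (n + 1) 1).all (fun v => a.contains v) then some a
      else
        match pvPickBranch clauses a with
        | none => some a
        | some bv =>
          match pvRecB clauses n depth fuel (a.insert bv true) (d + 1) with
          | some x =>
            if x.items.isEmpty then some x
            else
              match pvRecB clauses n depth fuel (a.insert bv false) (d + 1) with
              | none => some x
              | some y => some (pvNarrow x y)
          | none => pvRecB clauses n depth fuel (a.insert bv false) (d + 1)

def probe_dpll_alt (clauses : List (List Int)) (n : Int) (var : Int) (val : Bool) (depth : Int) : Option (List (Int × Bool)) :=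
  match pvRecB clauses n depth (clauses.flatten.length + 2) (PySem.Dict.ofList [(var, val)]) 0 with
  | none => none
  | some inter =>
    some ((PySem.List.pyRange 1 (n + 1) 1).filterMap (fun v => (inter.get? v).map (fun b => (v, b))))

-- ===== PRECONDITION & SPEC =====
def Spec_probe_dpll (clauses : List (List Int)) (n : Int) (var : Int) (val : Bool) (depth : Int) (out : Option (List (Int × Bool))) : Prop := out = probe_dpll_alt clauses n var val depth
instance (clauses : List (List Int)) (n : Int) (var : Int) (val : Bool) (depth : Int) (out : Option (List (Int × Bool))) : Decidable (Spec_probe_dpll clauses n var val depth out) := by unfold Spec_probe_dpll; infer_instance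

-- ===== CLAIM (what is proved, stated in full; the proofs are below) =====
def Claim_equal_probe_dpll : Prop := ∀ (clauses : List (List Int)) (n : Int) (var : Int) (val : Bool) (depth : Int), Dom_probe_dpll clauses n var val depth → Spec_probe_dpll clauses n var val depth (probe_dpll clauses n var val depth)

-- ===== LEMMAS AND PROOFS =====

-- the fold of pvNarrow over a list of leaves, none when there is no leaf
def pvCombine : List (PySem.Dict Int Bool) → Option (PySem.Dict Int Bool)
  | [] => none
  | x :: xs => some (xs.foldl pvNarrow x)

lemma pvUpPass_nodup (cls : List (List Int)) : ∀ (a : PySem.Dict Int Bool) (ch : Bool),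
    a.keys.Nodup → (pvUpPass a ch cls).1.keys.Nodup := by
  induction cls with
  | nil => intro a ch h; simpa [pvUpPass] using h
  | cons cl rest ih =>
    intro a ch h
    simp only [pvUpPass]
    rcases hscan : pvLitScan a cl [] with ⟨unset, sat⟩
    by_cases hs : sat = true
    · simpa [hs] using ih a ch h
    · rcases unset with _ | ⟨lit, _ | ⟨l2, tl⟩⟩
      · simpa [hs] using h
      · by_cases hc : a.contains |lit| = true
        · simpa [hs, hc] using ih a ch h
        · simpa [hs, hc] using ih _ true (PySem.Dict.nodup_keys_insert _ _ _ h)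
      · simpa [hs] using ih a ch h

lemma pvUpLoop_nodup (clauses : List (List Int)) : ∀ (fuel : Nat) (a : PySem.Dict Int Bool),
    a.keys.Nodup → (pvUpLoop clauses fuel a).1.keys.Nodup := by
  intro fuel
  induction fuel with
  | zero => intro a h; simpa [pvUpLoop] using h
  | succ fuel ih =>
    intro a h
    simp only [pvUpLoop]
    rcases hp : pvUpPass a false clauses with ⟨a', contra, changed⟩
    have ha' : a'.keys.Nodup := by
      have := pvUpPass_nodup clauses a false h
      rwa [hp] at this
    by_cases hcon : contra = true
    · simpa [hcon] using ha'
    · by_cases hch : changed = true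
      · simpa [hcon, hch] using ih a' ha'
      · simpa [hcon, hch] using ha'

lemma pvRecA_nodup (clauses : List (List Int)) (n depth : Int) :
    ∀ (fuel : Nat) (assign : PySem.Dict Int Bool) (d : Int), assign.keys.Nodup →
    ∀ l ∈ pvRecA clauses n depth fuel assign d, l.keys.Nodup := by
  intro fuel
  induction fuel with
  | zero => intro assign d _ l hl; simp [pvRecA] at hl
  | succ fuel ih =>
    intro assign d hnd l hl
    simp only [pvRecA] at hl
    rcases hup : pvUp clauses n assign with ⟨a, c⟩
    have ha : a.keys.Nodup := by
      have := pvUpLoop_nodup clauses (clauses.flatten.length + 1) assign hnd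
      rwa [show pvUpLoop clauses (clauses.flatten.length + 1) assign = (a, c) from hup] at this
    rw [hup] at hl
    by_cases hc : c = true
    · simp [hc] at hl
    · simp only [hc] at hl
      by_cases hd : d ≥ depth
      · simp [hd] at hl; simpa [hl] using ha
      · simp only [hd, if_false] at hl
        by_cases hu : ((PySem.List.pyRange 1 (n + 1) 1).filter (fun v => !(a.contains v))).isEmpty
        · simp [hu] at hl; simpa [hl] using ha
        · simp only [hu] at hl
          rcases hpb : pvPickBranch clauses a with _ | bv
          · simp [hpb] at hl; simpa [hl] using ha
          · simp only [hpb, Bool.false_eq_true, if_false, List.mem_append] at hl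
            rcases hl with hl | hl
            · exact ih _ _ (PySem.Dict.nodup_keys_insert _ _ _ ha) l hl
            · exact ih _ _ (PySem.Dict.nodup_keys_insert _ _ _ ha) l hl

lemma pvNarrow_nodup {x y : PySem.Dict Int Bool} (hx : x.keys.Nodup) : (pvNarrow x y).keys.Nodup := by
  have hsub : ((x.items.filter (fun p => y.get? p.1 == some p.2)).map (·.1)).Sublist (x.items.map (·.1)) :=
    List.Sublist.map _ (List.filter_sublist)
  simp only [PySem.Dict.keys] at hx ⊢
  exact List.Nodup.sublist hsub hx

lemma get?_pvNarrow {x y : PySem.Dict Int Bool} (hx : x.keys.Nodup) (k : Int) (b : Bool) :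
    (pvNarrow x y).get? k = some b ↔ x.get? k = some b ∧ y.get? k = some b := by
  have hn : (pvNarrow x y).keys.Nodup := pvNarrow_nodup hx
  rw [PySem.Dict.get?_eq_some_iff_mem_items _ _ _ hn, PySem.Dict.get?_eq_some_iff_mem_items _ _ _ hx]
  simp [pvNarrow, List.mem_filter]

lemma pvNarrow_assoc {x y z : PySem.Dict Int Bool} (hy : y.keys.Nodup) :
    pvNarrow (pvNarrow x y) z = pvNarrow x (pvNarrow y z) := by
  apply PySem.Dict.ext
  show ((x.items.filter _).filter _) = x.items.filter _
  rw [List.filter_filter]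
  apply List.filter_congr
  intro p _
  have h1 : ∀ b, ((pvNarrow y z).get? p.1 = some b ↔ y.get? p.1 = some b ∧ z.get? p.1 = some b) :=
    fun b => get?_pvNarrow hy p.1 b
  rcases p with ⟨k, b⟩
  rw [Bool.eq_iff_iff]
  simp only [Bool.and_eq_true, beq_iff_eq, h1 b]
  tauto

lemma foldl_pvNarrow_assoc : ∀ (ys : List (PySem.Dict Int Bool)) (x y : PySem.Dict Int Bool),
    y.keys.Nodup → ys.foldl pvNarrow (pvNarrow x y) = pvNarrow x (ys.foldl pvNarrow y) := by
  intro ys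
  induction ys with
  | nil => intro x y _; simp
  | cons z ys ih =>
    intro x y hy
    simp only [List.foldl_cons]
    rw [pvNarrow_assoc hy, ih x (pvNarrow y z) (pvNarrow_nodup hy)]

lemma pvNarrow_of_empty {x : PySem.Dict Int Bool} (h : x.items = []) (y : PySem.Dict Int Bool) :
    pvNarrow x y = x := by
  apply PySem.Dict.ext
  show (x.items.filter _) = x.items
  simp [h]

lemma pvCombine_append (L R : List (PySem.Dict Int Bool)) (hR : ∀ l ∈ R, l.keys.Nodup) :
    pvCombine (L ++ R) =
      match pvCombine L, pvCombine R with
      | none, r => r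
      | some x, none => some x
      | some x, some y => some (pvNarrow x y) := by
  rcases L with _ | ⟨lx, ls⟩
  · simp [pvCombine]
  · rcases R with _ | ⟨y, ys⟩
    · simp [pvCombine]
    · simp only [pvCombine, List.cons_append, List.foldl_cons, List.foldl_append]
      rw [foldl_pvNarrow_assoc ys _ y (hR y (by simp))]

lemma pvRecB_eq (clauses : List (List Int)) (n depth : Int) :
    ∀ (fuel : Nat) (assign : PySem.Dict Int Bool) (d : Int), assign.keys.Nodup →
    pvRecB clauses n depth fuel assign d = pvCombine (pvRecA clauses n depth fuel assign d) := by
  intro fuel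
  induction fuel with
  | zero => intro assign d _; rfl
  | succ fuel ih =>
    intro assign d hnd
    rcases hup : pvUp clauses n assign with ⟨a, c⟩
    have ha : a.keys.Nodup := by
      have h2 := pvUpLoop_nodup clauses (clauses.flatten.length + 1) assign hnd
      have : pvUpLoop clauses (clauses.flatten.length + 1) assign = (a, c) := hup
      rwa [this] at h2
    simp only [pvRecB, pvRecA, hup]
    by_cases hc : c = true
    · simp [hc, pvCombine]
    · simp only [hc, Bool.false_eq_true, if_false]
      by_cases hd : d ≥ depth
      · simp [hd, pvCombine]
      · simp only [hd, if_false]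
        have hleaf : ((PySem.List.pyRange 1 (n + 1) 1).filter (fun v => !(a.contains v))).isEmpty = (PySem.List.pyRange 1 (n + 1) 1).all (fun v => a.contains v) := by
          rw [Bool.eq_iff_iff]
          simp [List.isEmpty_iff, List.filter_eq_nil_iff]
        rw [← hleaf]
        by_cases hu : ((PySem.List.pyRange 1 (n + 1) 1).filter (fun v => !(a.contains v))).isEmpty = true
        · simp [hu, pvCombine]
        · simp only [hu, Bool.false_eq_true, if_false]
          rcases hpb : pvPickBranch clauses a with _ | bv
          · simp [pvCombine]
          · dsimp only
            have hL := ih (a.insert bv true) (d + 1) (PySem.Dict.nodup_keys_insert _ _ _ ha)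
            have hR := ih (a.insert bv false) (d + 1) (PySem.Dict.nodup_keys_insert _ _ _ ha)
            have hRnd : ∀ l ∈ pvRecA clauses n depth fuel (a.insert bv false) (d + 1), l.keys.Nodup :=
              pvRecA_nodup clauses n depth fuel _ _ (PySem.Dict.nodup_keys_insert _ _ _ ha)
            rw [hL, hR, pvCombine_append _ _ hRnd]
            rcases hCL : pvCombine (pvRecA clauses n depth fuel (a.insert bv true) (d + 1)) with _ | x <;>
              rcases hCR : pvCombine (pvRecA clauses n depth fuel (a.insert bv false) (d + 1)) with _ | y
            · rfl
            · rfl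
            · by_cases hx : x.items.isEmpty = true <;> simp [hx]
            · by_cases hx : x.items.isEmpty = true
              · have hxe : x.items = [] := by simpa [List.isEmpty_iff] using hx
                simp [hx, pvNarrow_of_empty hxe]
              · simp [hx]

lemma get?_foldl_pvNarrow : ∀ (ls : List (PySem.Dict Int Bool)) (l : PySem.Dict Int Bool),
    l.keys.Nodup → ∀ (k : Int) (b : Bool),
    (ls.foldl pvNarrow l).get? k = some b ↔ ∀ m ∈ l :: ls, m.get? k = some b := by
  intro ls
  induction ls with
  | nil => intro l _ k b; simp
  | cons m ls ih =>
    intro l hl k b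
    simp only [List.foldl_cons]
    rw [ih (pvNarrow l m) (pvNarrow_nodup hl) k b]
    constructor
    · intro h
      have h1 := h (pvNarrow l m) (by simp)
      have h2 := (get?_pvNarrow hl k b).1 h1
      intro x hx
      simp only [List.mem_cons] at hx
      rcases hx with rfl | rfl | hx
      · exact h2.1
      · exact h2.2
      · exact h x (by simp [hx])
    · intro h x hx
      simp only [List.mem_cons] at hx
      rcases hx with rfl | hx
      · exact (get?_pvNarrow hl k b).2 ⟨h l (by simp), h m (by simp)⟩
      · exact h x (by simp [hx])

lemma pvCollectVals_false (v : Int) : ∀ (L : List (PySem.Dict Int Bool)) (s : PySem.Set Bool),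
    (∃ m ∈ L, m.get? v = none) → (pvCollectVals v L s).2 = false := by
  intro L
  induction L with
  | nil => rintro s ⟨m, hm, _⟩; simp at hm
  | cons m rest ih =>
    rintro s ⟨m', hm', hnone⟩
    simp only [pvCollectVals]
    rcases hg : m.get? v with _ | b
    · rfl
    · simp only [List.mem_cons] at hm'
      rcases hm' with rfl | hm'
      · rw [hg] at hnone; cases hnone
      · exact ih _ ⟨m', hm', hnone⟩

lemma pvCollectVals_all (v : Int) : ∀ (L : List (PySem.Dict Int Bool)) (s : PySem.Set Bool),
    (∀ m ∈ L, (m.get? v).isSome) →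
    pvCollectVals v L s = (L.foldl (fun s m => s.add ((m.get? v).getD false)) s, true) := by
  intro L
  induction L with
  | nil => intro s _; rfl
  | cons m rest ih =>
    intro s h
    have hm := h m (by simp)
    rcases hg : m.get? v with _ | b
    · rw [hg] at hm; cases hm
    · simp only [pvCollectVals, hg, List.foldl_cons]
      rw [ih _ (fun x hx => h x (by simp [hx]))]
      simp


lemma pvSet_ofList_singleton {V : List Bool} (hne : V ≠ []) (b : Bool) (hall : ∀ x ∈ V, x = b) :
    PySem.Set.ofList V = [b] := by
  rw [← List.perm_singleton]
  rw [List.perm_ext_iff_of_nodup (PySem.Set.nodup_ofList V) (by simp)]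
  intro x
  simp only [PySem.Set.mem_ofList, List.mem_singleton]
  constructor
  · exact fun hx => hall x hx
  · rintro rfl
    rcases V with _ | ⟨y, ys⟩
    · exact absurd rfl hne
    · have := hall y (by simp)
      subst this
      simp

lemma pvFoldBuild {α β : Type} (f : List β → α → List β) (g : α → Option β)
    (hf : ∀ res v, f res v = res ++ (g v).toList) :
    ∀ (vs : List α) (res : List β), vs.foldl f res = res ++ vs.filterMap g := by
  intro vs
  induction vs with
  | nil => intro res; simp
  | cons v vs ih =>
    intro res
    simp only [List.foldl_cons, List.filterMap_cons]
    rw [ih, hf]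
    rcases g v with _ | b <;> simp

lemma pvStep_eq (l : PySem.Dict Int Bool) (ls : List (PySem.Dict Int Bool)) (hl : l.keys.Nodup)
    (res : List (Int × Bool)) (v : Int) :
    (match pvCollectVals v (l :: ls) PySem.Set.empty with
      | (vals, allHave) =>
        if allHave then
          match vals with
          | [b] => res ++ [(v, b)]
          | _ => res
        else res) =
    res ++ (((ls.foldl pvNarrow l).get? v).map (fun b => (v, b))).toList := by
  by_cases hall : ∀ m ∈ l :: ls, (m.get? v).isSome
  · rw [pvCollectVals_all v (l :: ls) PySem.Set.empty hall]
    have hV : (l :: ls).foldl (fun s m => s.add ((m.get? v).getD false)) PySem.Set.empty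
        = PySem.Set.ofList ((l :: ls).map (fun m => (m.get? v).getD false)) := by
      rw [← PySem.Set.update_map_eq_foldl_add, PySem.Set.update_empty]
    rcases hb0 : l.get? v with _ | b0
    · exact absurd (hb0 ▸ hall l (by simp)) (by simp)
    by_cases hcom : ∀ m ∈ l :: ls, m.get? v = some b0
    · have hone : PySem.Set.ofList ((l :: ls).map (fun m => (m.get? v).getD false)) = [b0] := by
        apply pvSet_ofList_singleton (by simp) b0
        intro x hx
        simp only [List.mem_map] at hx
        rcases hx with ⟨m, hm, rfl⟩
        simp [hcom m hm]
      have hget : (ls.foldl pvNarrow l).get? v = some b0 :=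
        (get?_foldl_pvNarrow ls l hl v b0).2 hcom
      simp only [hV, hone, hget]
      rfl
    · have hget : (ls.foldl pvNarrow l).get? v = none := by
        rcases hg : (ls.foldl pvNarrow l).get? v with _ | b
        · rfl
        · have hc := (get?_foldl_pvNarrow ls l hl v b).1 hg
          have := hc l (by simp)
          rw [hb0] at this
          cases this
          exact absurd hc hcom
      simp only [hV, hget]
      push_neg at hcom
      rcases hcom with ⟨m, hm, hmne⟩
      rcases hbm : m.get? v with _ | bm
      · exact absurd (hbm ▸ hall m hm) (by simp)
      have hbm' : bm ≠ b0 := by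
        rintro rfl; exact hmne hbm
      have hb0mem : b0 ∈ PySem.Set.ofList ((l :: ls).map (fun m => (m.get? v).getD false)) := by
        rw [PySem.Set.mem_ofList]
        exact List.mem_map.2 ⟨l, by simp, by simp [hb0]⟩
      have hbmmem : bm ∈ PySem.Set.ofList ((l :: ls).map (fun m => (m.get? v).getD false)) := by
        rw [PySem.Set.mem_ofList]
        exact List.mem_map.2 ⟨m, hm, by simp [hbm]⟩
      rcases hv : PySem.Set.ofList ((l :: ls).map (fun m => (m.get? v).getD false)) with _ | ⟨c, _ | ⟨c2, cs⟩⟩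
      · rw [List.map_cons] at hv
        simp [hv]
      · rw [hv] at hb0mem hbmmem
        simp only [List.mem_singleton] at hb0mem hbmmem
        exact absurd (hbmmem.trans hb0mem.symm) hbm'
      · rw [List.map_cons] at hv
        simp [hv]
  · have hfalse : (pvCollectVals v (l :: ls) PySem.Set.empty).2 = false := by
      apply pvCollectVals_false
      push_neg at hall
      rcases hall with ⟨m, hm, hns⟩
      exact ⟨m, hm, Option.not_isSome_iff_eq_none.1 hns⟩
    have hget : (ls.foldl pvNarrow l).get? v = none := by
      rcases hg : (ls.foldl pvNarrow l).get? v with _ | b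
      · rfl
      · have hc := (get?_foldl_pvNarrow ls l hl v b).1 hg
        push_neg at hall
        rcases hall with ⟨m, hm, hns⟩
        rw [hc m hm] at hns
        simp at hns
    rcases hcv : pvCollectVals v (l :: ls) PySem.Set.empty with ⟨vals, allHave⟩
    rw [hcv] at hfalse
    have hAH : allHave = false := by simpa using hfalse
    simp [hAH, hget]

theorem probe_dpll_spec : Claim_equal_probe_dpll := by
  intro clauses n var val depth _
  unfold Spec_probe_dpll probe_dpll probe_dpll_alt
  have hnd0 : (PySem.Dict.ofList [(var, val)]).keys.Nodup := PySem.Dict.nodup_keys_ofList _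
  rw [pvRecB_eq clauses n depth (clauses.flatten.length + 2) (PySem.Dict.ofList [(var, val)]) 0 hnd0]
  rcases hLA : pvRecA clauses n depth (clauses.flatten.length + 2) (PySem.Dict.ofList [(var, val)]) 0 with _ | ⟨l, ls⟩
  · simp [pvCombine]
  · have hl : l.keys.Nodup :=
      pvRecA_nodup clauses n depth _ _ _ hnd0 l (by rw [hLA]; simp)
    simp only [pvCombine, List.isEmpty_cons, Bool.false_eq_true, if_false]
    rw [pvFoldBuild _ (fun v => ((ls.foldl pvNarrow l).get? v).map (fun b => (v, b)))
      (fun res v => pvStep_eq l ls hl res v)]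
    simp
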